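-- pv_equiv track=rewrite | github.com/thomasthewalkercodes/interpersonalmotiveconflict | ai_pattern_analysis.py | encode_structure
-- ===== SOURCE A (Python) =====
-- def encode_structure(sequence):
--     """
--     Convert a sequence to its structural representation.
--
--     Args:
--         sequence: List of behaviors (e.g., ['motive_1', 'motive_2', 'motive_1'])
--
--     Returns:
--         tuple: Structural pattern (e.g., (0, 1, 0) for "ABA" pattern)
--         dict: Mapping of structure to actual motives
--
--     Example:
--         sequence = ['motive_3', 'motive_5', 'motive_3', 'motive_5']
--         returns: (0, 1, 0, 1), {0: 'motive_3', 1: 'motive_5'}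
--     """
--     if not sequence:
--         return tuple(), {}
--
--     # Create mapping: first unique element = 0, second = 1, etc.
--     motive_to_id = {}
--     id_to_motive = {}
--     next_id = 0
--
--     structure = []
--     for motive in sequence:
--         if motive not in motive_to_id:
--             motive_to_id[motive] = next_id
--             id_to_motive[next_id] = motive
--             next_id += 1
--
--         structure.append(motive_to_id[motive])
--
--     return tuple(structure), id_to_motive
-- ===== SOURCE B (Python) =====
-- def encode_structure(sequence):
--     # Brute-force recomputation: the code of an occurrence m is the number of
--     # distinct elements strictly before the FIRST occurrence of m; no mutable
--     # mapping table is ever built while scanning.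
--     structure = tuple(len(set(sequence[:sequence.index(m)])) for m in sequence)
--     # New codes appear in increasing order, so this comprehension inserts the
--     # keys 0,1,2,... in order; re-hits overwrite with the identical value.
--     id_to_motive = {c: m for c, m in zip(structure, sequence)}
--     return structure, id_to_motive
-- ===== Notes on version B (the rewrite author's own statement) =====
-- stated objective: alternative
-- what changed: Replaces A's incremental single-pass dictionary construction with a brute-force per-element recomputation: each code is computed independently as the number of distinct elements before that element's first occurrence (via list.index and a set over a prefix slice), and the id-to-motive dict is rebuilt by a comprehension over zip(codes, sequence); B maintains no mapping state at all, trading O(n) for O(n^2).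
import Mathlib
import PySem

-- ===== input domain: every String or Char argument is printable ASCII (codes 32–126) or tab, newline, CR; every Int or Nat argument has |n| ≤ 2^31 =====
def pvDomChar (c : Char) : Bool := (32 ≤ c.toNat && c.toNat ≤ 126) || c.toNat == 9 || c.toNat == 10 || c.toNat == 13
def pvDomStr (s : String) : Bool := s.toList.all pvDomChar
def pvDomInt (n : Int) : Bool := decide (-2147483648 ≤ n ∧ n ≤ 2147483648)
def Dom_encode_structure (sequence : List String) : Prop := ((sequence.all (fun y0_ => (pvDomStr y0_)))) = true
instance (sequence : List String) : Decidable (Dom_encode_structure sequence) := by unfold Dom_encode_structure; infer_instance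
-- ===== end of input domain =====

-- B replaces A's incremental mapping dictionary with stateless brute force: each
-- code is recomputed per element as the distinct-count of the prefix before that
-- element's first occurrence; the dict is rebuilt from zip(codes, sequence).

-- ===== PORT A =====
-- A's loop body: state = (motive_to_id, id_to_motive, next_id, structure)
def encodeStepA (st : PySem.Dict String Int × PySem.Dict Int String × Int × List Int) (m : String) :
    PySem.Dict String Int × PySem.Dict Int String × Int × List Int :=
  let st1 := if st.1.contains m = false
    then (st.1.insert m st.2.2.1, st.2.1.insert st.2.2.1 m, st.2.2.1 + 1, st.2.2.2)
    else st
  (st1.1, st1.2.1, st1.2.2.1, st1.2.2.2 ++ [st1.1.getD m 0])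

def encode_structure (sequence : List String) : List Int × (List (Int × String)) :=
  if sequence = [] then ([], [])
  else
    let final := sequence.foldl encodeStepA (PySem.Dict.empty, PySem.Dict.empty, 0, [])
    (final.2.2.2, final.2.1.items)

-- ===== PORT B =====
-- len(set(sequence[:sequence.index(m)])): m is drawn from sequence, so
-- sequence.index(m) always succeeds; getD 0 is unreachable.
def encode_structure_alt (sequence : List String) : List Int × (List (Int × String)) :=
  let structure_ : List Int := sequence.map (fun m =>
    ((PySem.Set.ofList (PySem.List.slice sequence none
        (some (((PySem.List.index? sequence m).getD 0 : Nat) : Int)))).length : Int))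
  let id_to_motive : PySem.Dict Int String :=
    (structure_.zip sequence).foldl (fun d p => d.insert p.1 p.2)
      (PySem.Dict.empty : PySem.Dict Int String)
  (structure_, id_to_motive.items)

-- ===== PRECONDITION & SPEC =====
def Spec_encode_structure (sequence : List String) (out : List Int × (List (Int × String))) : Prop := out = encode_structure_alt sequence
instance (sequence : List String) (out : List Int × (List (Int × String))) : Decidable (Spec_encode_structure sequence out) := by unfold Spec_encode_structure; infer_instance

-- ===== CLAIM (what is proved, stated in full; the proofs are below) =====
def Claim_equal_encode_structure : Prop := ∀ (sequence : List String), Dom_encode_structure sequence → Spec_encode_structure sequence (encode_structure sequence)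

-- ===== LEMMAS AND PROOFS =====

-- B's mapping table over an alphabet s (= A's motive_to_id invariant value)
def pvM2I (s : List String) : PySem.Dict String Int :=
  (PySem.List.enumerate s 0).foldl (fun d p => d.insert p.2 p.1) PySem.Dict.empty

-- A's id_to_motive invariant value
def pvI2M (s : List String) : PySem.Dict Int String :=
  (PySem.List.enumerate s 0).foldl (fun d p => d.insert p.1 p.2) PySem.Dict.empty

lemma pvSet_update_ext (l : List String) (s : PySem.Set String) :
    ∃ t, PySem.Set.update s l = s ++ t ∧ ∀ x ∈ t, x ∉ s := by
  induction l generalizing s with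
  | nil => exact ⟨[], by simp [PySem.Set.update], by simp⟩
  | cons x l ih =>
    by_cases hx : x ∈ s
    · obtain ⟨t, ht, hf⟩ := ih s
      refine ⟨t, ?_, hf⟩
      simpa [PySem.Set.update, PySem.Set.add, hx] using ht
    · obtain ⟨t, ht, hf⟩ := ih (s ++ [x])
      refine ⟨x :: t, ?_, ?_⟩
      · simpa [PySem.Set.update, PySem.Set.add, hx, List.append_assoc] using ht
      · intro y hy hys
        cases hy with
        | head => exact hx hys
        | tail _ hy => exact hf y hy (List.mem_append_left _ hys)

lemma pvM2I_contains (s : List String) (m : String) :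
    (pvM2I s).contains m = decide (m ∈ s) := by
  rw [pvM2I, PySem.Dict.contains_eq_decide_mem_keys,
    PySem.Dict.keys_foldl_insert_key (PySem.List.enumerate s 0) (fun p => p.2)
      (fun _ p => p.1) PySem.Dict.empty]
  simp only [PySem.List.map_snd_enumerate]
  have h2 : PySem.Set.update (PySem.Dict.empty : PySem.Dict String Int).keys s
      = PySem.Set.ofList s := rfl
  rw [h2]
  simp [PySem.Set.mem_ofList]

lemma pvM2I_snoc (s : List String) (m : String) :
    pvM2I (s ++ [m]) = (pvM2I s).insert m (s.length : Int) := by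
  simp [pvM2I, PySem.List.enumerate_append, List.foldl_append, PySem.List.enumerate]

lemma pvI2M_snoc (s : List String) (m : String) :
    pvI2M (s ++ [m]) = (pvI2M s).insert (s.length : Int) m := by
  simp [pvI2M, PySem.List.enumerate_append, List.foldl_append, PySem.List.enumerate]

lemma pvM2I_getD_stable (s t : List String) (m : String) (hm : m ∈ s) (h : ∀ x ∈ t, x ∉ s) :
    (pvM2I (s ++ t)).getD m 0 = (pvM2I s).getD m 0 := by
  have key : ∀ (ps : List (Int × String)) (d : PySem.Dict String Int),
      (∀ p ∈ ps, p.2 ≠ m) →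
      (ps.foldl (fun d p => d.insert p.2 p.1) d).getD m 0 = d.getD m 0 := by
    intro ps
    induction ps with
    | nil => intro d _; rfl
    | cons p ps ih =>
      intro d hne
      rw [List.foldl_cons, ih _ (fun q hq => hne q (List.mem_cons_of_mem _ hq)),
        PySem.Dict.getD_insert_of_ne _ _ _ (Ne.symm (hne p (List.mem_cons_self)))]
  rw [pvM2I, PySem.List.enumerate_append, List.foldl_append]
  exact key _ _ (fun p hp => by
    have : p.2 ∈ t := by
      have := List.mem_map_of_mem (f := fun q => q.2) hp
      rwa [PySem.List.map_snd_enumerate] at this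
    intro hpm; exact h p.2 this (hpm ▸ hm))

-- A's whole loop, characterised: seen alphabet, both tables, codes of the suffix
lemma pvLoopA (l : List String) (seen : List String) (acc : List Int) :
    l.foldl encodeStepA (pvM2I seen, pvI2M seen, (seen.length : Int), acc)
      = (pvM2I (PySem.Set.update seen l), pvI2M (PySem.Set.update seen l),
         ((PySem.Set.update seen l).length : Int),
         acc ++ l.map (fun m => (pvM2I (PySem.Set.update seen l)).getD m 0)) := by
  induction l generalizing seen acc with
  | nil => simp [PySem.Set.update]
  | cons m l ih =>
    rw [List.foldl_cons]
    by_cases hm : m ∈ seen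
    · have hadd : PySem.Set.add seen m = seen := by
        simp [PySem.Set.add, List.contains_eq_mem, hm]
      have hupd : PySem.Set.update seen (m :: l) = PySem.Set.update seen l := by
        simp [PySem.Set.update, hadd]
      have hstep : encodeStepA (pvM2I seen, pvI2M seen, (seen.length : Int), acc) m
          = (pvM2I seen, pvI2M seen, (seen.length : Int),
             acc ++ [(pvM2I seen).getD m 0]) := by
        simp [encodeStepA, pvM2I_contains, hm]
      rw [hstep, ih, hupd]
      obtain ⟨t, ht, hf⟩ := pvSet_update_ext l seen
      rw [ht, ← pvM2I_getD_stable seen t m hm hf]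
      simp
    · have hadd : PySem.Set.add seen m = seen ++ [m] := by
        simp [PySem.Set.add, List.contains_eq_mem, hm]
      have hupd : PySem.Set.update seen (m :: l) = PySem.Set.update (seen ++ [m]) l := by
        simp [PySem.Set.update, hadd]
      have hstep : encodeStepA (pvM2I seen, pvI2M seen, (seen.length : Int), acc) m
          = (pvM2I (seen ++ [m]), pvI2M (seen ++ [m]), ((seen ++ [m]).length : Int),
             acc ++ [(pvM2I (seen ++ [m])).getD m 0]) := by
        simp [encodeStepA, pvM2I_contains, hm, pvM2I_snoc, pvI2M_snoc]
      rw [hstep, ih, hupd]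
      obtain ⟨t, ht, hf⟩ := pvSet_update_ext l (seen ++ [m])
      rw [ht, ← pvM2I_getD_stable (seen ++ [m]) t m (by simp) hf]
      simp

-- B's code of m (distinct-count of the prefix before m's first occurrence)
-- equals A's table lookup, generalized over an already-seen alphabet.
lemma pvRank (pre : List String) (m : String) (suf : List String)
    (seen : PySem.Set String) (hpre : m ∉ pre) (hseen : m ∉ seen) :
    ((PySem.Set.update seen pre).length : Int)
      = (pvM2I (PySem.Set.update seen (pre ++ m :: suf))).getD m 0 := by
  induction pre generalizing seen with
  | nil =>
    have hadd : PySem.Set.add seen m = seen ++ [m] := by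
      simp [PySem.Set.add, List.contains_eq_mem, hseen]
    have hupd : PySem.Set.update seen ([] ++ m :: suf) = PySem.Set.update (seen ++ [m]) suf := by
      simp [PySem.Set.update, hadd]
    rw [hupd]
    obtain ⟨t, ht, hf⟩ := pvSet_update_ext suf (seen ++ [m])
    rw [ht, pvM2I_getD_stable (seen ++ [m]) t m (by simp) hf, pvM2I_snoc,
      PySem.Dict.getD_insert_self]
    simp [PySem.Set.update]
  | cons x pre ih =>
    have hupd1 : PySem.Set.update seen (x :: pre) = PySem.Set.update (PySem.Set.add seen x) pre := rfl
    have hupd2 : PySem.Set.update seen ((x :: pre) ++ m :: suf)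
        = PySem.Set.update (PySem.Set.add seen x) (pre ++ m :: suf) := rfl
    have hm' : m ∉ PySem.Set.add seen x := by
      intro hmem
      by_cases hx : x ∈ seen
      · simp only [PySem.Set.add] at hmem
        rw [if_pos (by simpa using hx)] at hmem
        exact hseen hmem
      · simp only [PySem.Set.add] at hmem
        rw [if_neg (by simpa using hx)] at hmem
        rcases List.mem_append.mp hmem with h | h
        · exact hseen h
        · exact hpre (by simp at h; simp [h])
    rw [hupd1, hupd2]
    exact ih _ (fun h => hpre (List.mem_cons_of_mem _ h)) hm'

-- lookup in pvI2M: the integer keys are the positions, so no dedup hypothesis needed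
lemma pvI2M_get? (s : List String) (r : Nat) (hr : r < s.length) :
    (pvI2M s).get? (r : Int) = some s[r] := by
  induction s using List.reverseRecOn with
  | nil => simp at hr
  | append_singleton s x ih =>
    rw [pvI2M_snoc]
    rcases Nat.lt_or_ge r s.length with h | h
    · rw [PySem.Dict.get?_insert_of_ne _ _ (by exact_mod_cast Nat.ne_of_lt h), ih h]
      congr 1
      exact (List.getElem_append_left h).symm
    · have hr' : r = s.length := by
        simp only [List.length_append, List.length_singleton] at hr; omega
      subst hr'
      rw [PySem.Dict.get?_insert_self]
      congr 1
      simp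
      
-- inserting a pair a dict already holds (keys unique) changes nothing
lemma pvInsert_eq_self {κ ν : Type} [BEq κ] [LawfulBEq κ] (d : PySem.Dict κ ν) (k : κ) (v : ν)
    (h : d.get? k = some v) (hnd : d.keys.Nodup) : d.insert k v = d := by
  apply PySem.Dict.ext
  have hc : d.contains k = true := by
    rw [PySem.Dict.contains_eq_isSome_get?, h]; rfl
  rw [PySem.Dict.items_insert_of_contains _ _ hc]
  have hfix : ∀ p ∈ d.items, (if p.1 == k then (k, v) else p) = p := by
    rintro ⟨p1, p2⟩ hp
    by_cases hk : p1 = k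
    · subst hk
      have hp2 : d.get? p1 = some p2 := PySem.Dict.get?_of_mem_items _ hp hnd
      rw [h] at hp2
      simp [Option.some.inj hp2]
    · simp [hk]
  rw [List.map_congr_left hfix]
  simp

lemma pvI2M_nodup_keys (s : List String) : (pvI2M s).keys.Nodup := by
  unfold pvI2M
  exact PySem.Dict.nodup_keys_foldl_insert_key (PySem.List.enumerate s 0)
    (fun (p : Int × String) => p.1) (fun _ p => p.2) PySem.Dict.empty
    PySem.Dict.nodup_keys_empty

-- B's dict-rebuilding fold over a suffix l of full = pre ++ l
lemma pvDictFold (full : List String) (l pre : List String) (h : full = pre ++ l) :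
    l.foldl (fun d m => d.insert ((pvM2I (PySem.Set.ofList full)).getD m 0) m)
        (pvI2M (PySem.Set.ofList pre))
      = pvI2M (PySem.Set.ofList full) := by
  induction l generalizing pre with
  | nil => rw [h]; simp
  | cons m t ih =>
    rw [List.foldl_cons]
    by_cases hm : m ∈ pre
    · -- re-hit: the insert is a no-op
      obtain ⟨k, hk⟩ := Option.isSome_iff_exists.mp
        ((PySem.List.index?_isSome_iff (xs := pre) (v := m)).mpr hm)
      obtain ⟨p1, p2, hsplit, hlen, hnot⟩ := (PySem.List.index?_eq_some_iff _ _ _).mp hk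
      have hfull : full = p1 ++ m :: (p2 ++ m :: t) := by
        rw [h, hsplit]; simp
      have hrank : (pvM2I (PySem.Set.ofList full)).getD m 0 = ((PySem.Set.ofList p1).length : Int) := by
        rw [hfull]
        exact (pvRank p1 m (p2 ++ m :: t) [] hnot (by simp)).symm
      -- Set.ofList pre = Set.ofList p1 ++ [m] ++ rest with m at index |Set.ofList p1|
      have hmnotin : m ∉ (PySem.Set.ofList p1 : List String) := by
        simpa [PySem.Set.mem_ofList] using hnot
      have hadd : PySem.Set.add (PySem.Set.ofList p1) m = PySem.Set.ofList p1 ++ [m] := by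
        simp [PySem.Set.add, List.contains_eq_mem, hmnotin]
      have hpre2 : PySem.Set.ofList pre
          = PySem.Set.update (PySem.Set.ofList p1 ++ [m]) p2 := by
        rw [hsplit, PySem.Set.ofList_eq_foldl, List.foldl_append, List.foldl_cons,
          ← PySem.Set.ofList_eq_foldl]
        rw [show List.foldl PySem.Set.add (PySem.Set.add (PySem.Set.ofList p1) m) p2
            = PySem.Set.update (PySem.Set.add (PySem.Set.ofList p1) m) p2 from rfl, hadd]
      obtain ⟨t2, ht2, _⟩ := pvSet_update_ext p2 (PySem.Set.ofList p1 ++ [m])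
      have hget : (pvI2M (PySem.Set.ofList pre)).get? ((PySem.Set.ofList p1).length : Int) = some m := by
        rw [hpre2, ht2]
        have hlt : (PySem.Set.ofList p1).length < ((PySem.Set.ofList p1 ++ [m]) ++ t2).length := by
          simp
        rw [pvI2M_get? _ _ hlt]
        congr 1
        rw [List.getElem_append_left (by simp)]
        simp
      rw [hrank, pvInsert_eq_self _ _ _ hget (pvI2M_nodup_keys _)]
      have hpreset : PySem.Set.ofList (pre ++ [m]) = PySem.Set.ofList pre := by
        have hmem : m ∈ (PySem.Set.ofList pre : List String) := by
          rw [PySem.Set.mem_ofList]; exact hm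
        rw [PySem.Set.ofList_eq_foldl, List.foldl_append, List.foldl_cons, List.foldl_nil,
          ← PySem.Set.ofList_eq_foldl]
        simp [PySem.Set.add, List.contains_eq_mem, hmem]
      have := ih (pre ++ [m]) (by rw [h]; simp)
      rwa [hpreset] at this
    · -- fresh element: the insert extends the table by one
      have hrank : (pvM2I (PySem.Set.ofList full)).getD m 0 = ((PySem.Set.ofList pre).length : Int) := by
        rw [h]
        exact (pvRank pre m t [] hm (by simp)).symm
      have hmnotin : m ∉ (PySem.Set.ofList pre : List String) := by
        simpa [PySem.Set.mem_ofList] using hm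
      have hadd : PySem.Set.ofList (pre ++ [m]) = PySem.Set.ofList pre ++ [m] := by
        show PySem.Set.update [] (pre ++ [m]) = _
        rw [PySem.Set.update]
        simp only [List.foldl_append, List.foldl_cons, List.foldl_nil]
        show PySem.Set.add (PySem.Set.ofList pre) m = _
        simp [PySem.Set.add, List.contains_eq_mem, hmnotin]
      rw [hrank, show (pvI2M (PySem.Set.ofList pre)).insert ((PySem.Set.ofList pre).length : Int) m
          = pvI2M (PySem.Set.ofList (pre ++ [m])) by rw [hadd, pvI2M_snoc]]
      exact ih (pre ++ [m]) (by rw [h]; simp)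

lemma pvZipMapSelf {α β : Type} (f : α → β) (l : List α) :
    (l.map f).zip l = l.map (fun x => (f x, x)) := by
  induction l with
  | nil => rfl
  | cons x t ih => simp [ih]

-- B's per-element brute-force code equals A's table lookup
lemma pvCodeB (sequence : List String) (m : String) (hm : m ∈ sequence) :
    ((PySem.Set.ofList (PySem.List.slice sequence none
        (some (((PySem.List.index? sequence m).getD 0 : Nat) : Int)))).length : Int)
      = (pvM2I (PySem.Set.ofList sequence)).getD m 0 := by
  obtain ⟨k, hk⟩ := Option.isSome_iff_exists.mp
    ((PySem.List.index?_isSome_iff (xs := sequence) (v := m)).mpr hm)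
  obtain ⟨pre, suf, hsplit, hlen, hnot⟩ := (PySem.List.index?_eq_some_iff _ _ _).mp hk
  rw [hk]
  simp only [Option.getD_some]
  rw [PySem.List.slice_to_natCast, hsplit, ← hlen, List.take_left]
  exact pvRank pre m suf [] hnot (by simp)

-- ===== VERDICT (by name: the statement is the Claim_ definition above) =====
theorem encode_structure_spec : Claim_equal_encode_structure := by
  intro sequence _
  unfold Spec_encode_structure
  have hstruct : sequence.map (fun m =>
      ((PySem.Set.ofList (PySem.List.slice sequence none
          (some (((PySem.List.index? sequence m).getD 0 : Nat) : Int)))).length : Int))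
      = sequence.map (fun m => (pvM2I (PySem.Set.ofList sequence)).getD m 0) :=
    List.map_congr_left (fun m hm => pvCodeB sequence m hm)
  by_cases h : sequence = []
  · subst h; rfl
  · rw [encode_structure, if_neg h]
    have h0 : ((PySem.Dict.empty : PySem.Dict String Int),
        (PySem.Dict.empty : PySem.Dict Int String), (0 : Int), ([] : List Int))
        = (pvM2I [], pvI2M [], ((List.length ([] : List String) : Int)), ([] : List Int)) := rfl
    rw [h0, pvLoopA]
    have hofl : PySem.Set.update ([] : List String) sequence = PySem.Set.ofList sequence := rfl
    rw [hofl]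
    simp only [encode_structure_alt, hstruct, List.nil_append]
    refine Prod.ext rfl ?_
    show (pvI2M (PySem.Set.ofList sequence)).items = _
    rw [pvZipMapSelf, List.foldl_map]
    have hemp : (PySem.Dict.empty : PySem.Dict Int String)
        = pvI2M (PySem.Set.ofList ([] : List String)) := rfl
    rw [hemp, pvDictFold sequence sequence [] rfl]
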